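-- pv_equiv track=rewrite | github.com/pypi-data/pypi-mirror-399 | packages/mediacatalog/mediacatalog-0.1.1.tar.gz/mediacatalog-0.1.1/media_catalog/cli.py | title_sort_key
-- ===== SOURCE A (Python) =====
-- def title_sort_key(title):
--     if not title:
--         return ""
--     lowered = title.strip().lower()
--     for article in ("the ", "a ", "an "):
--         if lowered.startswith(article):
--             return lowered[len(article) :]
--     return lowered
-- ===== SOURCE B (Python) =====
-- ARTICLES = {"the", "a", "an"}
--
-- def title_sort_key(title):
--     lowered = title.strip().lower()
--     i = lowered.find(" ")
--     if i != -1 and lowered[:i] in ARTICLES: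
--         return lowered[i + 1:]
--     return lowered
-- ===== Notes on version B (the rewrite author's own statement) =====
-- stated objective: simpler
-- what changed: Replace the loop over three leading-article prefix tests (each a startswith plus a length-based slice) by locating the first space once with str.find and testing the first word for membership in a set of articles, slicing once.
import Mathlib
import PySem

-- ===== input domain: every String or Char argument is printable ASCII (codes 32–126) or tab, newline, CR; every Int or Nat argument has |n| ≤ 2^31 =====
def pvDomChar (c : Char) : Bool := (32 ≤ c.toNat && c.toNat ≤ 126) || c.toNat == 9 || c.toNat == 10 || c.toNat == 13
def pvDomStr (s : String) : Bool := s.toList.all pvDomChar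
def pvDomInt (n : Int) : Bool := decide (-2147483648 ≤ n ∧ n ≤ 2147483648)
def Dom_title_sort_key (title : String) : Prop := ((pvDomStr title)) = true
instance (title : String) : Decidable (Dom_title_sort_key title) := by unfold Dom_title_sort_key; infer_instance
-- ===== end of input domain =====

set_option maxRecDepth 8192


-- B locates the first space once with str.find and tests the first word against a set of
-- articles, replacing A's loop of three leading-article prefix checks (objective: simpler).

-- ===== PORT A =====
def title_sort_key (title : String) : String :=
  if title = "" then ""
  else
    let lowered := PySem.Str.lower (PySem.Str.strip title)
    if PySem.Str.startswith lowered "the " then PySem.Str.slice lowered (some 4) none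
    else if PySem.Str.startswith lowered "a " then PySem.Str.slice lowered (some 2) none
    else if PySem.Str.startswith lowered "an " then PySem.Str.slice lowered (some 3) none
    else lowered

-- ===== PORT B =====
def pvArticles : List String := ["the", "a", "an"]

def title_sort_key_alt (title : String) : String :=
  let lowered := PySem.Str.lower (PySem.Str.strip title)
  let i := PySem.Str.find lowered " "
  if i ≠ -1 ∧ PySem.Str.slice lowered none (some i) ∈ pvArticles then
    PySem.Str.slice lowered (some (i + 1)) none
  else lowered

-- ===== PRECONDITION & SPEC =====
def Spec_title_sort_key (title : String) (out : String) : Prop := out = title_sort_key_alt title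
instance (title : String) (out : String) : Decidable (Spec_title_sort_key title out) := by unfold Spec_title_sort_key; infer_instance

-- ===== CLAIM (what is proved, stated in full; the proofs are below) =====
def Claim_equal_title_sort_key : Prop := ∀ (title : String), Dom_title_sort_key title → Spec_title_sort_key title (title_sort_key title)

-- ===== LEMMAS AND PROOFS =====

-- first space of `p ++ ' ' :: r` with no space in `p` is at index `p.length`
lemma pv_find_space (p r : List Char) (hp : ∀ c ∈ p, c ≠ ' ') :
    PySem.Chars.find (p ++ ' ' :: r) [' '] = (p.length : Int) := by
  have hinf : [' '] <:+: (p ++ ' ' :: r) := ⟨p, r, by simp⟩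
  have h0 : (0:Int) ≤ PySem.Chars.find (p ++ ' ' :: r) [' '] :=
    (PySem.Chars.find_nonneg_iff _ _).mpr hinf
  obtain ⟨hpre, hmin⟩ := PySem.Chars.find_spec h0
  set k := (PySem.Chars.find (p ++ ' ' :: r) [' ']).toNat with hk
  have hatp : [' '] <+: (p ++ ' ' :: r).drop p.length := by
    rw [List.drop_left]; exact ⟨r, rfl⟩
  have hle : k ≤ p.length := by
    by_contra h
    exact hmin p.length (by omega) hatp
  have heq : k = p.length := by
    rcases Nat.eq_or_lt_of_le hle with h | h
    · exact h
    · exfalso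
      obtain ⟨t, ht⟩ := hpre
      have h1 : ((p ++ ' ' :: r).drop k)[0]? = some ' ' := by rw [← ht]; rfl
      have h2 : (p ++ ' ' :: r)[k]? = some ' ' := by
        simpa [List.getElem?_drop] using h1
      have h3 : p[k]? = some ' ' := by
        rw [List.getElem?_append_left h] at h2; exact h2
      exact hp ' ' (List.mem_of_getElem? h3) rfl
  omega

-- when a space is found, the string decomposes around it
lemma pv_decomp (cs : List Char) (h : (0:Int) ≤ PySem.Chars.find cs [' ']) :
    ∃ u, cs = cs.take (PySem.Chars.find cs [' ']).toNat ++ ' ' :: u := by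
  obtain ⟨hpre, _⟩ := PySem.Chars.find_spec h
  obtain ⟨u, hu⟩ := hpre
  refine ⟨u, ?_⟩
  conv_lhs => rw [← List.take_append_drop (PySem.Chars.find cs [' ']).toNat cs, ← hu]
  simp

-- the core equivalence, for any already-lowered string
lemma pv_key (s : String) :
    (if PySem.Str.startswith s "the " then PySem.Str.slice s (some 4) none
     else if PySem.Str.startswith s "a " then PySem.Str.slice s (some 2) none
     else if PySem.Str.startswith s "an " then PySem.Str.slice s (some 3) none
     else s)
    = (if PySem.Str.find s " " ≠ -1 ∧ PySem.Str.slice s none (some (PySem.Str.find s " ")) ∈ pvArticles then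
         PySem.Str.slice s (some (PySem.Str.find s " " + 1)) none
       else s) := by
  have hsp : (" " : String).toList = [' '] := rfl
  by_cases h1 : PySem.Str.startswith s "the " = true
  · obtain ⟨r, hr⟩ := (PySem.Chars.startswith_iff _ _).mp ((PySem.Str.startswith_eq s "the ") ▸ h1)
    have hr' : s.toList = ['t','h','e'] ++ ' ' :: r := by rw [← hr]; rfl
    have hf : PySem.Str.find s " " = 3 := by
      rw [PySem.Str.find_eq, hsp, hr', pv_find_space ['t','h','e'] r (by simp)]; decide
    have hslice : PySem.Str.slice s none (some (PySem.Str.find s " ")) = "the" := by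
      apply String.toList_inj.mp
      rw [PySem.Str.toList_slice, hf, PySem.Chars.slice_eq_listSlice,
        PySem.List.slice_to _ (by norm_num : (0:Int) ≤ 3), hr']
      rfl
    rw [if_pos h1, hslice, hf, if_pos ⟨by norm_num, by simp [pvArticles]⟩]
    norm_num
  · by_cases h2 : PySem.Str.startswith s "a " = true
    · obtain ⟨r, hr⟩ := (PySem.Chars.startswith_iff _ _).mp ((PySem.Str.startswith_eq s "a ") ▸ h2)
      have hr' : s.toList = ['a'] ++ ' ' :: r := by rw [← hr]; rfl
      have hf : PySem.Str.find s " " = 1 := by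
        rw [PySem.Str.find_eq, hsp, hr', pv_find_space ['a'] r (by simp)]; decide
      have hslice : PySem.Str.slice s none (some (PySem.Str.find s " ")) = "a" := by
        apply String.toList_inj.mp
        rw [PySem.Str.toList_slice, hf, PySem.Chars.slice_eq_listSlice,
          PySem.List.slice_to _ (by norm_num : (0:Int) ≤ 1), hr']
        rfl
      rw [if_neg h1, if_pos h2, hslice, hf, if_pos ⟨by norm_num, by simp [pvArticles]⟩]
      norm_num
    · by_cases h3 : PySem.Str.startswith s "an " = true
      · obtain ⟨r, hr⟩ := (PySem.Chars.startswith_iff _ _).mp ((PySem.Str.startswith_eq s "an ") ▸ h3)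
        have hr' : s.toList = ['a','n'] ++ ' ' :: r := by rw [← hr]; rfl
        have hf : PySem.Str.find s " " = 2 := by
          rw [PySem.Str.find_eq, hsp, hr', pv_find_space ['a','n'] r (by simp)]; decide
        have hslice : PySem.Str.slice s none (some (PySem.Str.find s " ")) = "an" := by
          apply String.toList_inj.mp
          rw [PySem.Str.toList_slice, hf, PySem.Chars.slice_eq_listSlice,
            PySem.List.slice_to _ (by norm_num : (0:Int) ≤ 2), hr']
          rfl
        rw [if_neg h1, if_neg h2, if_pos h3, hslice, hf, if_pos ⟨by norm_num, by simp [pvArticles]⟩]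
        norm_num
      · rw [if_neg h1, if_neg h2, if_neg h3, if_neg]
        rintro ⟨hne, hmem⟩
        have h0 : (0:Int) ≤ PySem.Chars.find s.toList [' '] := by
          have hl := PySem.Chars.neg_one_le_find s.toList [' ']
          have : PySem.Str.find s " " = PySem.Chars.find s.toList [' '] := by
            rw [PySem.Str.find_eq, hsp]
          omega
        obtain ⟨u, hu⟩ := pv_decomp s.toList h0
        have htake : PySem.Str.slice s none (some (PySem.Str.find s " ")) =
            String.ofList (s.toList.take (PySem.Chars.find s.toList [' ']).toNat) := by
          apply String.toList_inj.mp
          rw [PySem.Str.toList_slice, PySem.Chars.slice_eq_listSlice, PySem.Str.find_eq, hsp,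
            PySem.List.slice_to _ h0]
          simp
        rw [htake] at hmem
        have hpre : ∀ q : List Char,
            s.toList.take (PySem.Chars.find s.toList [' ']).toNat = q →
            (q ++ [' ']) <+: s.toList := by
          intro q hq
          exact ⟨u, by rw [hu, hq]; simp⟩
        simp only [pvArticles, List.mem_cons, List.not_mem_nil, or_false] at hmem
        rcases hmem with hm | hm | hm
        · exact h1 ((PySem.Str.startswith_eq s "the ").trans
            ((PySem.Chars.startswith_iff _ _).mpr (hpre _ (by
              have := congrArg String.toList hm; simpa using this))))
        · exact h2 ((PySem.Str.startswith_eq s "a ").trans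
            ((PySem.Chars.startswith_iff _ _).mpr (hpre _ (by
              have := congrArg String.toList hm; simpa using this))))
        · exact h3 ((PySem.Str.startswith_eq s "an ").trans
            ((PySem.Chars.startswith_iff _ _).mpr (hpre _ (by
              have := congrArg String.toList hm; simpa using this))))

-- ===== VERDICT (by name: the statement is the Claim_ definition above) =====
theorem title_sort_key_spec : Claim_equal_title_sort_key := by
  intro title _
  unfold Spec_title_sort_key title_sort_key title_sort_key_alt
  by_cases h0 : title = ""
  · subst h0; decide
  · rw [if_neg h0]
    exact pv_key _
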